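-- pv_equiv track=rewrite | github.com/CofinCup/nonebot-plugin-todo-nlp | nonebot_plugin_todo_nlp/nlp_util.py | keyword_rearrange
-- ===== SOURCE A (Python) =====
-- def keyword_rearrange(keywords, text):
--     # 初始化结果列表
--     keyword_indices = {}
--     # 遍历单词列表，将包含关键字的单词添加到结果列表中
--     for keyword in keywords:
--         index = text.find(keyword)
--         if index != -1:  # if the keyword is found in the sentence
--             keyword_indices[keyword] = index
--
--         # sort the keywords based on their first occurrence index
--     sorted_keywords = sorted(keyword_indices, key=keyword_indices.get)
--     return sorted_keywords
-- ===== SOURCE B (Python) =====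
-- def keyword_rearrange(keywords, text):
--     # left-to-right scan of text positions; emit each keyword at its first match
--     result = []
--     emitted = set()
--     for i in range(len(text) + 1):
--         for keyword in keywords:
--             if keyword not in emitted and text.startswith(keyword, i):
--                 emitted.add(keyword)
--                 result.append(keyword)
--     return result
-- ===== Notes on version B (the rewrite author's own statement) =====
-- stated objective: alternative
-- what changed: Instead of computing each keyword's first index with str.find and stably sorting the dict keys by that index, B scans the text positions left-to-right once and emits each not-yet-emitted keyword (original order within a position) at its first matching position, so no index map and no sort are built.
import Mathlib
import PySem

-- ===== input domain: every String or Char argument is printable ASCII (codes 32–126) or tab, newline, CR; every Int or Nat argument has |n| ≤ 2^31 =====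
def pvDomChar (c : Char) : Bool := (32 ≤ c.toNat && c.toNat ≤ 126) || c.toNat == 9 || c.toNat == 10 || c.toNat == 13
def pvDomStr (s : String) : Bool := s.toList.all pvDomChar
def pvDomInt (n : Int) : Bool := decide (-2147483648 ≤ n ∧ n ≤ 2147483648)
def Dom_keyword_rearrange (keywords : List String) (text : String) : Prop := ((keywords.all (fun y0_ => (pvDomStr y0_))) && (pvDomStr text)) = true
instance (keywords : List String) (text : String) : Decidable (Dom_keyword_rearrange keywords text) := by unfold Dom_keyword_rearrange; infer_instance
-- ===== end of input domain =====

-- B replaces "find each keyword's first index, then stably sort the found keywords by it"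
-- with a single left-to-right scan of the text positions that emits each keyword at its first
-- match (original keyword order within a position); an alternative decomposition, not claimed faster.

-- ===== PORT A =====
def keyword_rearrange (keywords : List String) (text : String) : List String :=
  let keyword_indices : PySem.Dict String Int :=
    keywords.foldl (fun keyword_indices keyword =>
      let index := PySem.Str.find text keyword
      if index ≠ -1 then keyword_indices.insert keyword index else keyword_indices)
      PySem.Dict.empty
  PySem.List.sorted keyword_indices.keys (fun k => keyword_indices.getD k 0) false

-- ===== PORT B =====
def keyword_rearrange_alt (keywords : List String) (text : String) : List String :=
  let final :=
    (PySem.List.pyRange 0 (PySem.Str.len text + 1)).foldl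
      (fun (st : List String × PySem.Set String) i =>
        keywords.foldl (fun st keyword =>
          -- text.startswith(keyword, i): hand-ported; exact for the 0 ≤ i ≤ len(text) reached here
          if !(PySem.Set.contains st.2 keyword)
              && PySem.Chars.startswith (text.toList.drop i.toNat) keyword.toList then
            (st.1 ++ [keyword], PySem.Set.add st.2 keyword)
          else st) st)
      ([], PySem.Set.empty)
  final.1

-- ===== PRECONDITION & SPEC =====
def Spec_keyword_rearrange (keywords : List String) (text : String) (out : List String) : Prop := out = keyword_rearrange_alt keywords text
instance (keywords : List String) (text : String) (out : List String) : Decidable (Spec_keyword_rearrange keywords text out) := by unfold Spec_keyword_rearrange; infer_instance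

-- ===== CLAIM (what is proved, stated in full; the proofs are below) =====
def Claim_equal_keyword_rearrange : Prop := ∀ (keywords : List String) (text : String), Dom_keyword_rearrange keywords text → Spec_keyword_rearrange keywords text (keyword_rearrange keywords text)

-- ===== LEMMAS AND PROOFS =====

-- The common canonical form both programs reach: positions 0..j-1 in order, and at each
-- position the (deduplicated) keywords whose first occurrence index is that position.
def pvGroups (keywords : List String) (text : String) (j : Nat) : List String :=
  (List.range j).flatMap (fun (i : Nat) =>
    (PySem.Set.ofList keywords).filter (fun k => decide (PySem.Str.find text k = (i : Int))))

-- insertBy's cons step (definitional)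
lemma insertBy_cons {α : Type} (b : α → α → Bool) (x y : α) (ys : List α) :
    PySem.List.insertBy b x (y :: ys) =
      if b x y then x :: y :: ys else y :: PySem.List.insertBy b x ys := rfl

lemma insertBy_skip {α : Type} (b : α → α → Bool) (x : α) (as bs : List α)
    (h : ∀ y ∈ as, b x y = false) :
    PySem.List.insertBy b x (as ++ bs) = as ++ PySem.List.insertBy b x bs := by
  induction as with
  | nil => simp
  | cons a t ih =>
    have hb : b x a = false := h a (by simp)
    simp only [List.cons_append, insertBy_cons, hb, Bool.false_eq_true, if_false]
    rw [ih (fun y hy => h y (by simp [hy]))]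

lemma insertBy_front {α : Type} (b : α → α → Bool) (x : α) (bs : List α)
    (h : ∀ y ∈ bs, b x y = true) :
    PySem.List.insertBy b x bs = x :: bs := by
  cases bs with
  | nil => rfl
  | cons y ys => rw [insertBy_cons, h y (by simp)]; simp

-- Stable sort by an Int key with values in [0, n] is the concatenation of the key-groups.
lemma sorted_eq_groups (key : String → Int) (n : Nat) (L : List String)
    (h : ∀ k ∈ L, 0 ≤ key k ∧ key k ≤ (n : Int)) :
    PySem.List.sorted L key false
      = (List.range (n+1)).flatMap (fun (i : Nat) => L.filter (fun k => decide (key k = (i : Int)))) := by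
  induction L using List.reverseRecOn with
  | nil => simp [PySem.List.sorted_eq_foldl_insertBy]
  | append_singleton L x ih =>
    have hL := ih (fun k hk => h k (by simp [hk]))
    have hx := h x (by simp)
    obtain ⟨m, hm⟩ : ∃ m : Nat, key x = (m : Int) :=
      ⟨(key x).toNat, (Int.toNat_of_nonneg hx.1).symm⟩
    have hmn : m ≤ n := by omega
    rw [PySem.List.sorted_eq_foldl_insertBy, List.foldl_append, List.foldl_cons, List.foldl_nil,
      ← PySem.List.sorted_eq_foldl_insertBy, hL]
    have hsplit : List.range (n+1) = (List.range m ++ [m]) ++ (List.range (n - m)).map (fun j => (m+1) + j) := by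
      have h1 : n + 1 = (m+1) + (n - m) := by omega
      rw [h1, List.range_add, List.range_succ]
    rw [hsplit]
    simp only [List.flatMap_append, List.flatMap_cons, List.flatMap_nil, List.append_nil,
      List.flatMap_map]
    rw [insertBy_skip]
    · rw [insertBy_front]
      · have g1 : ∀ i ∈ List.range m,
            (L ++ [x]).filter (fun k => decide (key k = (i : Int)))
              = L.filter (fun k => decide (key k = (i : Int))) := by
          intro i hi
          have him : i < m := List.mem_range.mp hi
          rw [List.filter_append]
          have hd : (decide (key x = (i : Int))) = false := by
            simp only [decide_eq_false_iff_not]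
            omega
          simp [hd]
        have g2 : (L ++ [x]).filter (fun k => decide (key k = (m : Int)))
              = L.filter (fun k => decide (key k = (m : Int))) ++ [x] := by
          rw [List.filter_append]
          have hd : (decide (key x = (m : Int))) = true := by simp [hm]
          simp [hd]
        have g3 : (fun (a : Nat) => (L ++ [x]).filter (fun k => decide (key k = ((m + 1 + a : Nat) : Int))))
             = (fun (a : Nat) => L.filter (fun k => decide (key k = ((m + 1 + a : Nat) : Int)))) := by
          funext j
          rw [List.filter_append]
          have hd : (decide (key x = ((m + 1 + j : Nat) : Int))) = false := by
            simp only [decide_eq_false_iff_not]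
            omega
          simp only [List.filter_cons, List.filter_nil, hd, Bool.false_eq_true, if_false,
            List.append_nil]
        rw [List.flatMap_congr g1, g2, g3]
        simp [List.append_assoc]
      · intro y hy
        simp only [List.mem_flatMap, List.mem_range, List.mem_filter,
          decide_eq_true_eq] at hy
        obtain ⟨j, _, _, hkey⟩ := hy
        simp only [decide_eq_true_eq]
        omega
    · intro y hy
      simp only [List.mem_append, List.mem_flatMap, List.mem_range, List.mem_filter,
        decide_eq_true_eq] at hy
      simp only [decide_eq_false_iff_not, not_lt]
      rcases hy with ⟨i, hi, _, hkey⟩ | ⟨_, hkey⟩ <;> omega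

-- lookup in a dict built by inserting key-determined values
lemma get?_foldl_insert (g : String → Int) (l : List String) :
    ∀ (d : PySem.Dict String Int) (v : String),
    (l.foldl (fun d k => d.insert k (g k)) d).get? v
      = if v ∈ l then some (g v) else d.get? v := by
  induction l using List.reverseRecOn with
  | nil => simp
  | append_singleton t x ih =>
    intro d v
    rw [List.foldl_append, List.foldl_cons, List.foldl_nil]
    by_cases hv : v = x
    · subst hv; rw [PySem.Dict.get?_insert_self]; simp
    · rw [PySem.Dict.get?_insert_of_ne _ _ hv, ih]
      simp [hv]

-- set(filter) = filter(set)
lemma ofList_filter (p : String → Bool) (xs : List String) :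
    PySem.Set.ofList (xs.filter p) = (PySem.Set.ofList xs).filter p := by
  induction xs using List.reverseRecOn with
  | nil => simp [PySem.Set.ofList]
  | append_singleton t x ih =>
    rw [List.filter_append, PySem.Set.ofList_append_singleton, PySem.Set.add_eq_ite]
    by_cases hp : p x = true
    · rw [show List.filter p [x] = [x] from by simp [hp], PySem.Set.ofList_append_singleton,
        PySem.Set.add_eq_ite, ih]
      by_cases hx : x ∈ PySem.Set.ofList t
      · have hx2 : x ∈ (PySem.Set.ofList t).filter p := List.mem_filter.mpr ⟨hx, hp⟩
        simp [hx, hx2]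
      · have hx2 : x ∉ (PySem.Set.ofList t).filter p := fun hc => hx (List.mem_filter.mp hc).1
        simp [hx, hx2, List.filter_append, hp]
    · have hp' : p x = false := by simpa using hp
      rw [show List.filter p [x] = ([] : List String) from by simp [hp'], List.append_nil, ih]
      by_cases hx : x ∈ PySem.Set.ofList t
      · simp [hx]
      · simp [hx, List.filter_append, hp']

-- find = i (a Nat) iff the keyword matches at i and at no earlier position
lemma find_eq_nat_iff (text k : String) (i : Nat) :
    PySem.Str.find text k = (i : Int) ↔
      (k.toList <+: text.toList.drop i ∧ ∀ j < i, ¬ k.toList <+: text.toList.drop j) := by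
  have hbr : PySem.Str.find text k = PySem.Chars.find text.toList k.toList := by
    simp
  rw [hbr]
  constructor
  · intro h
    have h0 : 0 ≤ PySem.Chars.find text.toList k.toList := by rw [h]; exact Int.natCast_nonneg i
    have hs := PySem.Chars.find_spec h0
    have ht : (PySem.Chars.find text.toList k.toList).toNat = i := by omega
    rw [ht] at hs
    exact hs
  · rintro ⟨hp, hmin⟩
    have hin : 0 ≤ PySem.Chars.find text.toList k.toList := by
      rw [PySem.Chars.find_nonneg_iff, ← PySem.Chars.isIn_iff_infix,
        ← PySem.Chars.exists_prefix_drop_iff_isIn]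
      exact ⟨i, hp⟩
    have hs := PySem.Chars.find_spec hin
    have h1 : ¬ (i < (PySem.Chars.find text.toList k.toList).toNat) := fun hc => hs.2 i hc hp
    have h2 : ¬ ((PySem.Chars.find text.toList k.toList).toNat < i) := fun hc => hmin _ hc hs.1
    omega

-- the startswith test of B at position i
lemma startswith_at_iff (text k : String) (i : Nat) :
    (PySem.Chars.startswith (text.toList.drop ((i : Int)).toNat) k.toList = true)
      ↔ k.toList <+: text.toList.drop i := by
  rw [Int.toNat_natCast, PySem.Chars.startswith_iff]

-- B's inner loop over a sublist ks of the keywords, started at a state that has emitted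
-- exactly the keywords whose first match is before position i: it appends (deduplicated,
-- in order) the keywords of ks whose first match is exactly i, to both components.
lemma inner_loop (keywords : List String) (text : String) (i : Nat)
    (res : List String) (S : PySem.Set String)
    (hS : ∀ x, x ∈ S ↔ x ∈ keywords ∧ 0 ≤ PySem.Str.find text x ∧ PySem.Str.find text x < (i : Int)) :
    ∀ ks : List String, (∀ k ∈ ks, k ∈ keywords) →
      ks.foldl (fun st keyword =>
          if !(PySem.Set.contains st.2 keyword)
              && PySem.Chars.startswith (text.toList.drop ((i : Int)).toNat) keyword.toList then
            (st.1 ++ [keyword], PySem.Set.add st.2 keyword)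
          else st) (res, S)
        = (res ++ (PySem.Set.ofList ks).filter (fun k => decide (PySem.Str.find text k = (i : Int))),
           S ++ (PySem.Set.ofList ks).filter (fun k => decide (PySem.Str.find text k = (i : Int)))) := by
  intro ks
  induction ks using List.reverseRecOn with
  | nil => intro _; simp [PySem.Set.ofList]
  | append_singleton t k ih =>
    intro hks
    have hkkw : k ∈ keywords := hks k (by simp)
    rw [List.foldl_append, List.foldl_cons, List.foldl_nil,
      ih (fun y hy => hks y (by simp [hy]))]
    set q : String → Bool := fun k => decide (PySem.Str.find text k = (i : Int)) with hq
    set E := (PySem.Set.ofList t).filter q with hE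
    have hEmem : ∀ x, x ∈ E → x ∈ t ∧ PySem.Str.find text x = (i : Int) := by
      intro x hx
      rw [hE, List.mem_filter, PySem.Set.mem_ofList] at hx
      exact ⟨hx.1, of_decide_eq_true hx.2⟩
    have hofl : PySem.Set.ofList (t ++ [k]) = PySem.Set.add (PySem.Set.ofList t) k :=
      PySem.Set.ofList_append_singleton t k
    by_cases hsw : PySem.Chars.startswith (text.toList.drop ((i : Int)).toNat) k.toList = true
    · -- k matches at position i
      have hpre : k.toList <+: text.toList.drop i := (startswith_at_iff text k i).mp hsw
      by_cases hmem : k ∈ S ++ E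
      · -- already emitted: no change, and k contributes nothing new
        have hcont : PySem.Set.contains (S ++ E) k = true := by
          rw [PySem.Set.contains_iff]; exact hmem
        have hnew : (PySem.Set.add (PySem.Set.ofList t) k).filter q = E := by
          rcases List.mem_append.mp hmem with hmS | hmE
          · -- in S: first match strictly before i, so find k ≠ i
            have hlt := (hS k).mp hmS
            have hne : q k = false := by rw [hq]; exact decide_eq_false (by omega)
            rw [PySem.Set.add_eq_ite]
            by_cases hkt : k ∈ PySem.Set.ofList t
            · rw [if_pos hkt, hE]
            · rw [if_neg hkt, List.filter_append, hE]
              simp only [List.filter_cons, hne, Bool.false_eq_true, if_false, List.filter_nil,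
                List.append_nil]
          · -- already in E, hence already in t
            have hkt : k ∈ PySem.Set.ofList t := by
              rw [PySem.Set.mem_ofList]; exact (hEmem k hmE).1
            rw [PySem.Set.add_eq_ite, if_pos hkt, hE]
        rw [hofl, hnew]
        simp
        intro h1 h2
        rcases List.mem_append.mp hmem with h | h
        · exact absurd h h1
        · exact absurd h h2
      · -- fresh: its first match is exactly i and it gets emitted
        have hcont : PySem.Set.contains (S ++ E) k = false := by
          cases hb : PySem.Set.contains (S ++ E) k with
          | false => rfl
          | true => rw [PySem.Set.contains_iff] at hb; exact absurd hb hmem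
        have hnS : k ∉ S := fun hc => hmem (List.mem_append.mpr (Or.inl hc))
        have hnE : k ∉ E := fun hc => hmem (List.mem_append.mpr (Or.inr hc))
        have hfind : PySem.Str.find text k = (i : Int) := by
          rw [find_eq_nat_iff]
          refine ⟨hpre, fun j hj hcontra => ?_⟩
          -- a match before i would have put k into S
          have hin : 0 ≤ PySem.Chars.find text.toList k.toList := by
            rw [PySem.Chars.find_nonneg_iff, ← PySem.Chars.isIn_iff_infix,
              ← PySem.Chars.exists_prefix_drop_iff_isIn]
            exact ⟨j, hcontra⟩
          have hbr : PySem.Str.find text k = PySem.Chars.find text.toList k.toList := by simp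
          have hsp := PySem.Chars.find_spec hin
          have hle : (PySem.Chars.find text.toList k.toList).toNat ≤ j :=
            not_lt.mp (fun hc => hsp.2 j hc hcontra)
          exact hnS ((hS k).mpr ⟨hkkw, by omega, by omega⟩)
        have hqk : q k = true := by rw [hq]; exact decide_eq_true hfind
        have hkt : k ∉ PySem.Set.ofList t := by
          intro hc
          apply hnE
          rw [hE, List.mem_filter]
          exact ⟨hc, hqk⟩
        have hnew : (PySem.Set.add (PySem.Set.ofList t) k).filter q = E ++ [k] := by
          rw [PySem.Set.add_eq_ite, if_neg hkt, List.filter_append, hE]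
          simp only [List.filter_cons, hqk, if_true, List.filter_nil]
        have hadd : PySem.Set.add (S ++ E) k = (S ++ E) ++ [k] :=
          PySem.Set.add_of_not_mem hmem
        rw [hofl, hnew]
        simp [hadd, List.append_assoc]
        exact ⟨hnS, hnE, (PySem.Chars.startswith_iff _ _).mpr hpre⟩
    · -- no match at position i: find k ≠ i, nothing changes
      have hne : q k = false := by
        rw [hq]
        refine decide_eq_false fun hc => hsw ?_
        exact (startswith_at_iff text k i).mpr ((find_eq_nat_iff text k i).mp hc).1
      have hnew : (PySem.Set.add (PySem.Set.ofList t) k).filter q = E := by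
        rw [PySem.Set.add_eq_ite]
        by_cases hkt : k ∈ PySem.Set.ofList t
        · rw [if_pos hkt, hE]
        · rw [if_neg hkt, List.filter_append, hE]
          simp only [List.filter_cons, hne, Bool.false_eq_true, if_false, List.filter_nil,
            List.append_nil]
      rw [hofl, hnew]
      simp
      intro _ _
      cases hb : PySem.Chars.startswith (List.drop i text.toList) k.toList with
      | false => rfl
      | true =>
        exact absurd ((startswith_at_iff text k i).mpr
          ((PySem.Chars.startswith_iff _ _).mp hb)) hsw

-- membership in the canonical form
lemma mem_pvGroups (keywords : List String) (text : String) (j : Nat) (x : String) :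
    x ∈ pvGroups keywords text j
      ↔ x ∈ keywords ∧ 0 ≤ PySem.Str.find text x ∧ PySem.Str.find text x < (j : Int) := by
  simp only [pvGroups, List.mem_flatMap, List.mem_range, List.mem_filter,
    PySem.Set.mem_ofList, decide_eq_true_eq]
  constructor
  · rintro ⟨i, hij, hmem, hF⟩
    exact ⟨hmem, by omega, by omega⟩
  · rintro ⟨hmem, h0, hj⟩
    exact ⟨(PySem.Str.find text x).toNat, by omega, hmem, by omega⟩

-- B's outer loop: after scanning positions 0..j-1 both components hold the groups in order
lemma outer_loop (keywords : List String) (text : String) : ∀ j : Nat,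
    (List.range j).foldl (fun (st : List String × PySem.Set String) (i : Nat) =>
        keywords.foldl (fun st keyword =>
          if !(PySem.Set.contains st.2 keyword)
              && PySem.Chars.startswith (text.toList.drop ((i : Int)).toNat) keyword.toList then
            (st.1 ++ [keyword], PySem.Set.add st.2 keyword)
          else st) st) ([], PySem.Set.empty)
      = (pvGroups keywords text j, pvGroups keywords text j) := by
  intro j
  induction j with
  | zero => simp [pvGroups, PySem.Set.empty]
  | succ j ih =>
    rw [List.range_succ, List.foldl_append, List.foldl_cons, List.foldl_nil, ih]
    rw [inner_loop keywords text j (pvGroups keywords text j) (pvGroups keywords text j)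
      (fun x => mem_pvGroups keywords text j x) keywords (fun _ h => h)]
    simp [pvGroups, List.range_succ, List.flatMap_append]

-- A reaches the canonical form
lemma A_eq (keywords : List String) (text : String) :
    keyword_rearrange keywords text = pvGroups keywords text (text.toList.length + 1) := by
  set p : String → Bool := fun k => decide (PySem.Str.find text k ≠ -1) with hp
  set D := keywords.foldl (fun d k =>
        if PySem.Str.find text k ≠ -1 then d.insert k (PySem.Str.find text k) else d)
        (PySem.Dict.empty : PySem.Dict String Int) with hDdef
  have hD : D = (keywords.filter p).foldl
          (fun d k => d.insert k (PySem.Str.find text k)) PySem.Dict.empty := by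
    rw [hDdef, PySem.List.foldl_ite_eq_foldl_filter
      (fun k => PySem.Str.find text k ≠ -1)
      (fun (d : PySem.Dict String Int) k => d.insert k (PySem.Str.find text k))]
  have hkeys : D.keys = PySem.Set.ofList (keywords.filter p) := by
    rw [hD, PySem.Dict.keys_foldl_insert]
    rw [show (PySem.Dict.empty : PySem.Dict String Int).keys = [] from rfl]
    exact PySem.Set.update_nil_left _
  have hget : ∀ v, v ∈ keywords.filter p → D.getD v 0 = PySem.Str.find text v := by
    intro v hv
    show (D.get? v).getD 0 = _
    rw [hD, get?_foldl_insert]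
    simp [hv]
  show PySem.List.sorted D.keys (fun k => D.getD k 0) false = _
  rw [hkeys]
  have hbounds : ∀ k ∈ PySem.Set.ofList (keywords.filter p),
      0 ≤ D.getD k 0 ∧ D.getD k 0 ≤ ((text.toList.length : Nat) : Int) := by
    intro k hk
    rw [PySem.Set.mem_ofList] at hk
    have hgk := hget k hk
    have hpk : p k = true := (List.mem_filter.mp hk).2
    have hne : PySem.Str.find text k ≠ -1 := of_decide_eq_true hpk
    have hbr : PySem.Str.find text k = PySem.Chars.find text.toList k.toList := by simp
    have hge := PySem.Chars.neg_one_le_find text.toList k.toList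
    have hle := PySem.Chars.find_le_length text.toList k.toList
    rw [hgk]
    omega
  rw [sorted_eq_groups (fun k => D.getD k 0) text.toList.length _ hbounds]
  unfold pvGroups
  apply List.flatMap_congr
  intro i _
  have hcg : (PySem.Set.ofList (keywords.filter p)).filter (fun k => decide (D.getD k 0 = (i : Int)))
       = (PySem.Set.ofList (keywords.filter p)).filter (fun k => decide (PySem.Str.find text k = (i : Int))) := by
    apply List.filter_congr
    intro k hk
    rw [PySem.Set.mem_ofList] at hk
    rw [hget k hk]
  rw [hcg, ofList_filter, List.filter_filter]
  apply List.filter_congr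
  intro k _
  by_cases hfk : PySem.Str.find text k = (i : Int)
  · have hpk : p k = true := by
      rw [hp]
      exact decide_eq_true (by omega)
    have hd : decide (PySem.Str.find text k = (i : Int)) = true := decide_eq_true hfk
    rw [hpk, hd]
    rfl
  · have hd : decide (PySem.Str.find text k = (i : Int)) = false := decide_eq_false hfk
    rw [hd]
    simp only [Bool.false_and]

-- B reaches the canonical form
lemma B_eq (keywords : List String) (text : String) :
    keyword_rearrange_alt keywords text = pvGroups keywords text (text.toList.length + 1) := by
  have hlen : PySem.Str.len text + 1 = ((text.toList.length + 1 : Nat) : Int) := by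
    rw [PySem.Str.len_eq]
    push_cast
    ring
  show ((PySem.List.pyRange 0 (PySem.Str.len text + 1)).foldl
      (fun (st : List String × PySem.Set String) i =>
        keywords.foldl (fun st keyword =>
          -- text.startswith(keyword, i): hand-ported; exact for the 0 ≤ i ≤ len(text) reached here
          if !(PySem.Set.contains st.2 keyword)
              && PySem.Chars.startswith (text.toList.drop i.toNat) keyword.toList then
            (st.1 ++ [keyword], PySem.Set.add st.2 keyword)
          else st) st)
      ([], PySem.Set.empty)).1 = _
  rw [hlen, PySem.List.pyRange_zero_natCast, List.foldl_map, outer_loop]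

-- ===== VERDICT (by name: the statement is the Claim_ definition above) =====
theorem keyword_rearrange_spec : Claim_equal_keyword_rearrange := by
  intro keywords text _
  unfold Spec_keyword_rearrange
  rw [A_eq, B_eq]
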